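-- pv_equiv track=rewrite | github.com/mwecauictclub/ict-club-attendance-api | src/config/sessions.py | get_next_session_after
-- ===== SOURCE A (Python) =====
-- SESSIONS = {
--     "2026-01-30": {
--         "department": "Networking",
--         "code": "NET30JAN",
--         "description": "Design and implementation of robust networks"
--     },
--     "2026-02-06": {
--         "department": "Computer Maintenance",
--         "code": "COMP06FEB",
--         "description": "Hardware/software troubleshooting and repair"
--     },
--     "2026-02-13": {
--         "department": "Graphic Design",
--         "code": "GRAPH13FEB",
--         "description": "Visual design using Adobe tools & Canva"
--     },
--     "2026-02-20": {
--         "department": "Artificial Intelligence (AI) & Machine Learning",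
--         "code": "AI20FEB",
--         "description": "AI-driven automation and prototyping"
--     },
--     "2026-02-27": {
--         "department": "Cybersecurity",
--         "code": "CYBER27FEB",
--         "description": "Ethical hacking, digital forensics, and secure computing"
--     },
--     "2026-03-06": {
--         "department": "Programming",
--         "code": "PROG06MAR",
--         "description": "Software development in Python, JavaScript, PHP, etc."
--     },
--     "2026-03-13": {
--         "department": "Networking",
--         "code": "NET13MAR",
--         "description": "Design and implementation of robust networks"
--     },
--     "2026-03-20": {
--         "department": "Computer Maintenance",
--         "code": "COMP20MAR",
--         "description": "Hardware/software troubleshooting and repair"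
--     },
--     "2026-03-27": {
--         "department": "Graphic Design",
--         "code": "GRAPH27MAR",
--         "description": "Visual design using Adobe tools & Canva"
--     },
--     "2026-04-03": {
--         "department": "Artificial Intelligence (AI) & Machine Learning",
--         "code": "AI03APR",
--         "description": "AI-driven automation and prototyping"
--     },
-- }
--
-- def get_next_session_after(date_str):
--     """
--     Get the next session after a given date.
--
--     Args:
--         date_str: Date string in format YYYY-MM-DD
--
--     Returns:
--         dict: Next session details with 'date' key, or None
--     """
--     dates = sorted(SESSIONS.keys())
--     for d in dates:
--         if d > date_str:
--             session = SESSIONS[d].copy()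
--             session['date'] = d
--             return session
--     return None
-- ===== SOURCE B (Python) =====
-- # B keeps the schedule as a chronologically sorted flat table of records
-- # (date, department, code, description) and binary-searches it; no dict,
-- # no per-call sort, and the result dict is assembled directly.
--
-- SCHEDULE = [
--     ("2026-01-30", "Networking", "NET30JAN",
--      "Design and implementation of robust networks"),
--     ("2026-02-06", "Computer Maintenance", "COMP06FEB",
--      "Hardware/software troubleshooting and repair"),
--     ("2026-02-13", "Graphic Design", "GRAPH13FEB",
--      "Visual design using Adobe tools & Canva"),
--     ("2026-02-20", "Artificial Intelligence (AI) & Machine Learning", "AI20FEB",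
--      "AI-driven automation and prototyping"),
--     ("2026-02-27", "Cybersecurity", "CYBER27FEB",
--      "Ethical hacking, digital forensics, and secure computing"),
--     ("2026-03-06", "Programming", "PROG06MAR",
--      "Software development in Python, JavaScript, PHP, etc."),
--     ("2026-03-13", "Networking", "NET13MAR",
--      "Design and implementation of robust networks"),
--     ("2026-03-20", "Computer Maintenance", "COMP20MAR",
--      "Hardware/software troubleshooting and repair"),
--     ("2026-03-27", "Graphic Design", "GRAPH27MAR",
--      "Visual design using Adobe tools & Canva"),
--     ("2026-04-03", "Artificial Intelligence (AI) & Machine Learning", "AI03APR",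
--      "AI-driven automation and prototyping"),
-- ]
--
--
-- def get_next_session_after(date_str):
--     """Binary search for the first record strictly after date_str in the
--     pre-sorted SCHEDULE table."""
--     lo, hi = 0, len(SCHEDULE)
--     while lo < hi:
--         mid = (lo + hi) // 2
--         if SCHEDULE[mid][0] <= date_str:
--             lo = mid + 1
--         else:
--             hi = mid
--     if lo == len(SCHEDULE):
--         return None
--     d, dept, code, desc = SCHEDULE[lo]
--     return {"department": dept, "code": code, "description": desc, "date": d}
-- ===== Notes on version B (the rewrite author's own statement) =====
-- stated objective: alternative
-- what changed: A's per-call sorted()+linear scan over a dict of dicts is replaced by a module-level chronologically sorted flat table of (date, department, code, description) records with a hand-written binary search for the first date greater than date_str, assembling the result dict directly instead of copying and mutating a stored dict.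
import Mathlib
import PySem

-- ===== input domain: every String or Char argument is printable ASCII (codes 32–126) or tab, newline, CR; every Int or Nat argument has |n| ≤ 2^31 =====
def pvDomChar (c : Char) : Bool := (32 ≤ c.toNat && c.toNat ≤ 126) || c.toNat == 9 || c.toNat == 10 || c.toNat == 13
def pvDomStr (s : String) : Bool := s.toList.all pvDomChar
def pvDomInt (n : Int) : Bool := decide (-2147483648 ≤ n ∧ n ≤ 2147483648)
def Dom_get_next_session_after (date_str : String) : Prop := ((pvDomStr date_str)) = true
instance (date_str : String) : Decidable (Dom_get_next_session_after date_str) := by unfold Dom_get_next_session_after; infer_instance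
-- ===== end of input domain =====

-- B replaces A's dict-of-dicts with per-call sort + linear scan by a pre-sorted flat record table
-- with a binary search (alternative structure; return value proved equal on all inputs).

-- ===== PORT A =====
def SESSIONS : PySem.Dict String (PySem.Dict String String) :=
  PySem.Dict.ofList [
    ("2026-01-30", PySem.Dict.ofList [("department", "Networking"), ("code", "NET30JAN"), ("description", "Design and implementation of robust networks")]),
    ("2026-02-06", PySem.Dict.ofList [("department", "Computer Maintenance"), ("code", "COMP06FEB"), ("description", "Hardware/software troubleshooting and repair")]),
    ("2026-02-13", PySem.Dict.ofList [("department", "Graphic Design"), ("code", "GRAPH13FEB"), ("description", "Visual design using Adobe tools & Canva")]),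
    ("2026-02-20", PySem.Dict.ofList [("department", "Artificial Intelligence (AI) & Machine Learning"), ("code", "AI20FEB"), ("description", "AI-driven automation and prototyping")]),
    ("2026-02-27", PySem.Dict.ofList [("department", "Cybersecurity"), ("code", "CYBER27FEB"), ("description", "Ethical hacking, digital forensics, and secure computing")]),
    ("2026-03-06", PySem.Dict.ofList [("department", "Programming"), ("code", "PROG06MAR"), ("description", "Software development in Python, JavaScript, PHP, etc.")]),
    ("2026-03-13", PySem.Dict.ofList [("department", "Networking"), ("code", "NET13MAR"), ("description", "Design and implementation of robust networks")]),
    ("2026-03-20", PySem.Dict.ofList [("department", "Computer Maintenance"), ("code", "COMP20MAR"), ("description", "Hardware/software troubleshooting and repair")]),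
    ("2026-03-27", PySem.Dict.ofList [("department", "Graphic Design"), ("code", "GRAPH27MAR"), ("description", "Visual design using Adobe tools & Canva")]),
    ("2026-04-03", PySem.Dict.ofList [("department", "Artificial Intelligence (AI) & Machine Learning"), ("code", "AI03APR"), ("description", "AI-driven automation and prototyping")])
  ]

-- the 'for d in dates: if d > date_str: return …' loop of A
def goA (date_str : String) : List String → Option (List (String × String))
  | [] => none
  | d :: rest =>
    if d > date_str then
      match SESSIONS.get? d with            -- SESSIONS[d] (key always present); .copy() then session['date'] = d
      | some s => some ((s.insert "date" d).items)
      | none => none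
    else goA date_str rest

def get_next_session_after (date_str : String) : Option (List (String × String)) :=
  goA date_str (PySem.List.sorted SESSIONS.keys (fun x => x))

-- ===== PORT B =====
-- the module-level SCHEDULE table of Source B: chronologically sorted (date, department, code, description) records
def SCHEDULE : List (String × String × String × String) := [
  ("2026-01-30", "Networking", "NET30JAN", "Design and implementation of robust networks"),
  ("2026-02-06", "Computer Maintenance", "COMP06FEB", "Hardware/software troubleshooting and repair"),
  ("2026-02-13", "Graphic Design", "GRAPH13FEB", "Visual design using Adobe tools & Canva"),
  ("2026-02-20", "Artificial Intelligence (AI) & Machine Learning", "AI20FEB", "AI-driven automation and prototyping"),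
  ("2026-02-27", "Cybersecurity", "CYBER27FEB", "Ethical hacking, digital forensics, and secure computing"),
  ("2026-03-06", "Programming", "PROG06MAR", "Software development in Python, JavaScript, PHP, etc."),
  ("2026-03-13", "Networking", "NET13MAR", "Design and implementation of robust networks"),
  ("2026-03-20", "Computer Maintenance", "COMP20MAR", "Hardware/software troubleshooting and repair"),
  ("2026-03-27", "Graphic Design", "GRAPH27MAR", "Visual design using Adobe tools & Canva"),
  ("2026-04-03", "Artificial Intelligence (AI) & Machine Learning", "AI03APR", "AI-driven automation and prototyping")
]

-- the hand-written 'while lo < hi' binary-search loop of B; fuel only makes it total (never exhausted at the call below)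
def bsLoop (date_str : String) : Nat → Nat → Nat → Nat
  | 0, lo, _ => lo
  | fuel+1, lo, hi =>
    if lo < hi then
      let mid := (lo + hi) / 2
      if (SCHEDULE.getD mid ("", "", "", "")).1 ≤ date_str then bsLoop date_str fuel (mid+1) hi
      else bsLoop date_str fuel lo mid
    else lo

def get_next_session_after_alt (date_str : String) : Option (List (String × String)) :=
  let lo := bsLoop date_str SCHEDULE.length 0 SCHEDULE.length
  if lo = SCHEDULE.length then none
  else
    let r := SCHEDULE.getD lo ("", "", "", "")   -- d, dept, code, desc = SCHEDULE[lo]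
    some [("department", r.2.1), ("code", r.2.2.1), ("description", r.2.2.2), ("date", r.1)]

-- ===== PRECONDITION & SPEC =====
def Spec_get_next_session_after (date_str : String) (out : Option (List (String × String))) : Prop := out = get_next_session_after_alt date_str
instance (date_str : String) (out : Option (List (String × String))) : Decidable (Spec_get_next_session_after date_str out) := by unfold Spec_get_next_session_after; infer_instance

-- ===== CLAIM (what is proved, stated in full; the proofs are below) =====
def Claim_equal_get_next_session_after : Prop := ∀ (date_str : String), Dom_get_next_session_after date_str → Spec_get_next_session_after date_str (get_next_session_after date_str)

-- ===== LEMMAS AND PROOFS =====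

-- sorted(SESSIONS.keys()) is the insertion-order key list itself (already strictly increasing)
theorem sortedKeys : PySem.List.sorted SESSIONS.keys (fun x => x) = ["2026-01-30", "2026-02-06", "2026-02-13", "2026-02-20", "2026-02-27", "2026-03-06", "2026-03-13", "2026-03-20", "2026-03-27", "2026-04-03"] := by
  apply PySem.List.sorted_eq_of_perm_of_pairwise_lt
  · exact List.Perm.of_eq (by decide)
  · simp only [List.pairwise_cons, List.mem_cons, List.not_mem_nil, or_false, forall_eq_or_imp, forall_eq, false_implies, implies_true, List.Pairwise.nil, and_true]
    simp only [String.lt_iff_toList_lt]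
    repeat' apply And.intro
    all_goals decide

theorem get_next_session_after_eq_alt (date_str : String) :
    get_next_session_after date_str = get_next_session_after_alt date_str := by
  by_cases h0 : date_str < ("2026-01-30" : String)
  · -- first key greater than date_str is "2026-01-30"
    have hlt0 : date_str < ("2026-01-30" : String) := h0
    have hnle0 : ¬ (("2026-01-30" : String) ≤ date_str) := not_le.mpr hlt0
    have hlt1 : date_str < ("2026-02-06" : String) := lt_of_lt_of_le h0 (le_of_lt (by simp only [String.lt_iff_toList_lt]; decide))
    have hnle1 : ¬ (("2026-02-06" : String) ≤ date_str) := not_le.mpr hlt1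
    have hlt2 : date_str < ("2026-02-13" : String) := lt_of_lt_of_le h0 (le_of_lt (by simp only [String.lt_iff_toList_lt]; decide))
    have hnle2 : ¬ (("2026-02-13" : String) ≤ date_str) := not_le.mpr hlt2
    have hlt3 : date_str < ("2026-02-20" : String) := lt_of_lt_of_le h0 (le_of_lt (by simp only [String.lt_iff_toList_lt]; decide))
    have hnle3 : ¬ (("2026-02-20" : String) ≤ date_str) := not_le.mpr hlt3
    have hlt4 : date_str < ("2026-02-27" : String) := lt_of_lt_of_le h0 (le_of_lt (by simp only [String.lt_iff_toList_lt]; decide))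
    have hnle4 : ¬ (("2026-02-27" : String) ≤ date_str) := not_le.mpr hlt4
    have hlt5 : date_str < ("2026-03-06" : String) := lt_of_lt_of_le h0 (le_of_lt (by simp only [String.lt_iff_toList_lt]; decide))
    have hnle5 : ¬ (("2026-03-06" : String) ≤ date_str) := not_le.mpr hlt5
    have hlt6 : date_str < ("2026-03-13" : String) := lt_of_lt_of_le h0 (le_of_lt (by simp only [String.lt_iff_toList_lt]; decide))
    have hnle6 : ¬ (("2026-03-13" : String) ≤ date_str) := not_le.mpr hlt6
    have hlt7 : date_str < ("2026-03-20" : String) := lt_of_lt_of_le h0 (le_of_lt (by simp only [String.lt_iff_toList_lt]; decide))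
    have hnle7 : ¬ (("2026-03-20" : String) ≤ date_str) := not_le.mpr hlt7
    have hlt8 : date_str < ("2026-03-27" : String) := lt_of_lt_of_le h0 (le_of_lt (by simp only [String.lt_iff_toList_lt]; decide))
    have hnle8 : ¬ (("2026-03-27" : String) ≤ date_str) := not_le.mpr hlt8
    have hlt9 : date_str < ("2026-04-03" : String) := lt_of_lt_of_le h0 (le_of_lt (by simp only [String.lt_iff_toList_lt]; decide))
    have hnle9 : ¬ (("2026-04-03" : String) ≤ date_str) := not_le.mpr hlt9
    simp [get_next_session_after, get_next_session_after_alt, goA, bsLoop, SCHEDULE, sortedKeys, gt_iff_lt, hlt0, hnle0, hlt1, hnle1, hlt2, hnle2, hlt3, hnle3, hlt4, hnle4, hlt5, hnle5, hlt6, hnle6, hlt7, hnle7, hlt8, hnle8, hlt9, hnle9] <;> decide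
  by_cases h1 : date_str < ("2026-02-06" : String)
  · -- first key greater than date_str is "2026-02-06"
    have hle0 : ("2026-01-30" : String) ≤ date_str := not_lt.mp h0
    have hlt1 : date_str < ("2026-02-06" : String) := h1
    have hnle1 : ¬ (("2026-02-06" : String) ≤ date_str) := not_le.mpr hlt1
    have hlt2 : date_str < ("2026-02-13" : String) := lt_of_lt_of_le h1 (le_of_lt (by simp only [String.lt_iff_toList_lt]; decide))
    have hnle2 : ¬ (("2026-02-13" : String) ≤ date_str) := not_le.mpr hlt2
    have hlt3 : date_str < ("2026-02-20" : String) := lt_of_lt_of_le h1 (le_of_lt (by simp only [String.lt_iff_toList_lt]; decide))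
    have hnle3 : ¬ (("2026-02-20" : String) ≤ date_str) := not_le.mpr hlt3
    have hlt4 : date_str < ("2026-02-27" : String) := lt_of_lt_of_le h1 (le_of_lt (by simp only [String.lt_iff_toList_lt]; decide))
    have hnle4 : ¬ (("2026-02-27" : String) ≤ date_str) := not_le.mpr hlt4
    have hlt5 : date_str < ("2026-03-06" : String) := lt_of_lt_of_le h1 (le_of_lt (by simp only [String.lt_iff_toList_lt]; decide))
    have hnle5 : ¬ (("2026-03-06" : String) ≤ date_str) := not_le.mpr hlt5
    have hlt6 : date_str < ("2026-03-13" : String) := lt_of_lt_of_le h1 (le_of_lt (by simp only [String.lt_iff_toList_lt]; decide))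
    have hnle6 : ¬ (("2026-03-13" : String) ≤ date_str) := not_le.mpr hlt6
    have hlt7 : date_str < ("2026-03-20" : String) := lt_of_lt_of_le h1 (le_of_lt (by simp only [String.lt_iff_toList_lt]; decide))
    have hnle7 : ¬ (("2026-03-20" : String) ≤ date_str) := not_le.mpr hlt7
    have hlt8 : date_str < ("2026-03-27" : String) := lt_of_lt_of_le h1 (le_of_lt (by simp only [String.lt_iff_toList_lt]; decide))
    have hnle8 : ¬ (("2026-03-27" : String) ≤ date_str) := not_le.mpr hlt8
    have hlt9 : date_str < ("2026-04-03" : String) := lt_of_lt_of_le h1 (le_of_lt (by simp only [String.lt_iff_toList_lt]; decide))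
    have hnle9 : ¬ (("2026-04-03" : String) ≤ date_str) := not_le.mpr hlt9
    simp [get_next_session_after, get_next_session_after_alt, goA, bsLoop, SCHEDULE, sortedKeys, gt_iff_lt, h0, hle0, hlt1, hnle1, hlt2, hnle2, hlt3, hnle3, hlt4, hnle4, hlt5, hnle5, hlt6, hnle6, hlt7, hnle7, hlt8, hnle8, hlt9, hnle9] <;> decide
  by_cases h2 : date_str < ("2026-02-13" : String)
  · -- first key greater than date_str is "2026-02-13"
    have hle0 : ("2026-01-30" : String) ≤ date_str := not_lt.mp h0
    have hle1 : ("2026-02-06" : String) ≤ date_str := not_lt.mp h1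
    have hlt2 : date_str < ("2026-02-13" : String) := h2
    have hnle2 : ¬ (("2026-02-13" : String) ≤ date_str) := not_le.mpr hlt2
    have hlt3 : date_str < ("2026-02-20" : String) := lt_of_lt_of_le h2 (le_of_lt (by simp only [String.lt_iff_toList_lt]; decide))
    have hnle3 : ¬ (("2026-02-20" : String) ≤ date_str) := not_le.mpr hlt3
    have hlt4 : date_str < ("2026-02-27" : String) := lt_of_lt_of_le h2 (le_of_lt (by simp only [String.lt_iff_toList_lt]; decide))
    have hnle4 : ¬ (("2026-02-27" : String) ≤ date_str) := not_le.mpr hlt4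
    have hlt5 : date_str < ("2026-03-06" : String) := lt_of_lt_of_le h2 (le_of_lt (by simp only [String.lt_iff_toList_lt]; decide))
    have hnle5 : ¬ (("2026-03-06" : String) ≤ date_str) := not_le.mpr hlt5
    have hlt6 : date_str < ("2026-03-13" : String) := lt_of_lt_of_le h2 (le_of_lt (by simp only [String.lt_iff_toList_lt]; decide))
    have hnle6 : ¬ (("2026-03-13" : String) ≤ date_str) := not_le.mpr hlt6
    have hlt7 : date_str < ("2026-03-20" : String) := lt_of_lt_of_le h2 (le_of_lt (by simp only [String.lt_iff_toList_lt]; decide))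
    have hnle7 : ¬ (("2026-03-20" : String) ≤ date_str) := not_le.mpr hlt7
    have hlt8 : date_str < ("2026-03-27" : String) := lt_of_lt_of_le h2 (le_of_lt (by simp only [String.lt_iff_toList_lt]; decide))
    have hnle8 : ¬ (("2026-03-27" : String) ≤ date_str) := not_le.mpr hlt8
    have hlt9 : date_str < ("2026-04-03" : String) := lt_of_lt_of_le h2 (le_of_lt (by simp only [String.lt_iff_toList_lt]; decide))
    have hnle9 : ¬ (("2026-04-03" : String) ≤ date_str) := not_le.mpr hlt9
    simp [get_next_session_after, get_next_session_after_alt, goA, bsLoop, SCHEDULE, sortedKeys, gt_iff_lt, h0, hle0, h1, hle1, hlt2, hnle2, hlt3, hnle3, hlt4, hnle4, hlt5, hnle5, hlt6, hnle6, hlt7, hnle7, hlt8, hnle8, hlt9, hnle9] <;> decide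
  by_cases h3 : date_str < ("2026-02-20" : String)
  · -- first key greater than date_str is "2026-02-20"
    have hle0 : ("2026-01-30" : String) ≤ date_str := not_lt.mp h0
    have hle1 : ("2026-02-06" : String) ≤ date_str := not_lt.mp h1
    have hle2 : ("2026-02-13" : String) ≤ date_str := not_lt.mp h2
    have hlt3 : date_str < ("2026-02-20" : String) := h3
    have hnle3 : ¬ (("2026-02-20" : String) ≤ date_str) := not_le.mpr hlt3
    have hlt4 : date_str < ("2026-02-27" : String) := lt_of_lt_of_le h3 (le_of_lt (by simp only [String.lt_iff_toList_lt]; decide))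
    have hnle4 : ¬ (("2026-02-27" : String) ≤ date_str) := not_le.mpr hlt4
    have hlt5 : date_str < ("2026-03-06" : String) := lt_of_lt_of_le h3 (le_of_lt (by simp only [String.lt_iff_toList_lt]; decide))
    have hnle5 : ¬ (("2026-03-06" : String) ≤ date_str) := not_le.mpr hlt5
    have hlt6 : date_str < ("2026-03-13" : String) := lt_of_lt_of_le h3 (le_of_lt (by simp only [String.lt_iff_toList_lt]; decide))
    have hnle6 : ¬ (("2026-03-13" : String) ≤ date_str) := not_le.mpr hlt6
    have hlt7 : date_str < ("2026-03-20" : String) := lt_of_lt_of_le h3 (le_of_lt (by simp only [String.lt_iff_toList_lt]; decide))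
    have hnle7 : ¬ (("2026-03-20" : String) ≤ date_str) := not_le.mpr hlt7
    have hlt8 : date_str < ("2026-03-27" : String) := lt_of_lt_of_le h3 (le_of_lt (by simp only [String.lt_iff_toList_lt]; decide))
    have hnle8 : ¬ (("2026-03-27" : String) ≤ date_str) := not_le.mpr hlt8
    have hlt9 : date_str < ("2026-04-03" : String) := lt_of_lt_of_le h3 (le_of_lt (by simp only [String.lt_iff_toList_lt]; decide))
    have hnle9 : ¬ (("2026-04-03" : String) ≤ date_str) := not_le.mpr hlt9
    simp [get_next_session_after, get_next_session_after_alt, goA, bsLoop, SCHEDULE, sortedKeys, gt_iff_lt, h0, hle0, h1, hle1, h2, hle2, hlt3, hnle3, hlt4, hnle4, hlt5, hnle5, hlt6, hnle6, hlt7, hnle7, hlt8, hnle8, hlt9, hnle9] <;> decide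
  by_cases h4 : date_str < ("2026-02-27" : String)
  · -- first key greater than date_str is "2026-02-27"
    have hle0 : ("2026-01-30" : String) ≤ date_str := not_lt.mp h0
    have hle1 : ("2026-02-06" : String) ≤ date_str := not_lt.mp h1
    have hle2 : ("2026-02-13" : String) ≤ date_str := not_lt.mp h2
    have hle3 : ("2026-02-20" : String) ≤ date_str := not_lt.mp h3
    have hlt4 : date_str < ("2026-02-27" : String) := h4
    have hnle4 : ¬ (("2026-02-27" : String) ≤ date_str) := not_le.mpr hlt4
    have hlt5 : date_str < ("2026-03-06" : String) := lt_of_lt_of_le h4 (le_of_lt (by simp only [String.lt_iff_toList_lt]; decide))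
    have hnle5 : ¬ (("2026-03-06" : String) ≤ date_str) := not_le.mpr hlt5
    have hlt6 : date_str < ("2026-03-13" : String) := lt_of_lt_of_le h4 (le_of_lt (by simp only [String.lt_iff_toList_lt]; decide))
    have hnle6 : ¬ (("2026-03-13" : String) ≤ date_str) := not_le.mpr hlt6
    have hlt7 : date_str < ("2026-03-20" : String) := lt_of_lt_of_le h4 (le_of_lt (by simp only [String.lt_iff_toList_lt]; decide))
    have hnle7 : ¬ (("2026-03-20" : String) ≤ date_str) := not_le.mpr hlt7
    have hlt8 : date_str < ("2026-03-27" : String) := lt_of_lt_of_le h4 (le_of_lt (by simp only [String.lt_iff_toList_lt]; decide))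
    have hnle8 : ¬ (("2026-03-27" : String) ≤ date_str) := not_le.mpr hlt8
    have hlt9 : date_str < ("2026-04-03" : String) := lt_of_lt_of_le h4 (le_of_lt (by simp only [String.lt_iff_toList_lt]; decide))
    have hnle9 : ¬ (("2026-04-03" : String) ≤ date_str) := not_le.mpr hlt9
    simp [get_next_session_after, get_next_session_after_alt, goA, bsLoop, SCHEDULE, sortedKeys, gt_iff_lt, h0, hle0, h1, hle1, h2, hle2, h3, hle3, hlt4, hnle4, hlt5, hnle5, hlt6, hnle6, hlt7, hnle7, hlt8, hnle8, hlt9, hnle9] <;> decide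
  by_cases h5 : date_str < ("2026-03-06" : String)
  · -- first key greater than date_str is "2026-03-06"
    have hle0 : ("2026-01-30" : String) ≤ date_str := not_lt.mp h0
    have hle1 : ("2026-02-06" : String) ≤ date_str := not_lt.mp h1
    have hle2 : ("2026-02-13" : String) ≤ date_str := not_lt.mp h2
    have hle3 : ("2026-02-20" : String) ≤ date_str := not_lt.mp h3
    have hle4 : ("2026-02-27" : String) ≤ date_str := not_lt.mp h4
    have hlt5 : date_str < ("2026-03-06" : String) := h5
    have hnle5 : ¬ (("2026-03-06" : String) ≤ date_str) := not_le.mpr hlt5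
    have hlt6 : date_str < ("2026-03-13" : String) := lt_of_lt_of_le h5 (le_of_lt (by simp only [String.lt_iff_toList_lt]; decide))
    have hnle6 : ¬ (("2026-03-13" : String) ≤ date_str) := not_le.mpr hlt6
    have hlt7 : date_str < ("2026-03-20" : String) := lt_of_lt_of_le h5 (le_of_lt (by simp only [String.lt_iff_toList_lt]; decide))
    have hnle7 : ¬ (("2026-03-20" : String) ≤ date_str) := not_le.mpr hlt7
    have hlt8 : date_str < ("2026-03-27" : String) := lt_of_lt_of_le h5 (le_of_lt (by simp only [String.lt_iff_toList_lt]; decide))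
    have hnle8 : ¬ (("2026-03-27" : String) ≤ date_str) := not_le.mpr hlt8
    have hlt9 : date_str < ("2026-04-03" : String) := lt_of_lt_of_le h5 (le_of_lt (by simp only [String.lt_iff_toList_lt]; decide))
    have hnle9 : ¬ (("2026-04-03" : String) ≤ date_str) := not_le.mpr hlt9
    simp [get_next_session_after, get_next_session_after_alt, goA, bsLoop, SCHEDULE, sortedKeys, gt_iff_lt, h0, hle0, h1, hle1, h2, hle2, h3, hle3, h4, hle4, hlt5, hnle5, hlt6, hnle6, hlt7, hnle7, hlt8, hnle8, hlt9, hnle9] <;> decide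
  by_cases h6 : date_str < ("2026-03-13" : String)
  · -- first key greater than date_str is "2026-03-13"
    have hle0 : ("2026-01-30" : String) ≤ date_str := not_lt.mp h0
    have hle1 : ("2026-02-06" : String) ≤ date_str := not_lt.mp h1
    have hle2 : ("2026-02-13" : String) ≤ date_str := not_lt.mp h2
    have hle3 : ("2026-02-20" : String) ≤ date_str := not_lt.mp h3
    have hle4 : ("2026-02-27" : String) ≤ date_str := not_lt.mp h4
    have hle5 : ("2026-03-06" : String) ≤ date_str := not_lt.mp h5
    have hlt6 : date_str < ("2026-03-13" : String) := h6
    have hnle6 : ¬ (("2026-03-13" : String) ≤ date_str) := not_le.mpr hlt6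
    have hlt7 : date_str < ("2026-03-20" : String) := lt_of_lt_of_le h6 (le_of_lt (by simp only [String.lt_iff_toList_lt]; decide))
    have hnle7 : ¬ (("2026-03-20" : String) ≤ date_str) := not_le.mpr hlt7
    have hlt8 : date_str < ("2026-03-27" : String) := lt_of_lt_of_le h6 (le_of_lt (by simp only [String.lt_iff_toList_lt]; decide))
    have hnle8 : ¬ (("2026-03-27" : String) ≤ date_str) := not_le.mpr hlt8
    have hlt9 : date_str < ("2026-04-03" : String) := lt_of_lt_of_le h6 (le_of_lt (by simp only [String.lt_iff_toList_lt]; decide))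
    have hnle9 : ¬ (("2026-04-03" : String) ≤ date_str) := not_le.mpr hlt9
    simp [get_next_session_after, get_next_session_after_alt, goA, bsLoop, SCHEDULE, sortedKeys, gt_iff_lt, h0, hle0, h1, hle1, h2, hle2, h3, hle3, h4, hle4, h5, hle5, hlt6, hnle6, hlt7, hnle7, hlt8, hnle8, hlt9, hnle9] <;> decide
  by_cases h7 : date_str < ("2026-03-20" : String)
  · -- first key greater than date_str is "2026-03-20"
    have hle0 : ("2026-01-30" : String) ≤ date_str := not_lt.mp h0
    have hle1 : ("2026-02-06" : String) ≤ date_str := not_lt.mp h1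
    have hle2 : ("2026-02-13" : String) ≤ date_str := not_lt.mp h2
    have hle3 : ("2026-02-20" : String) ≤ date_str := not_lt.mp h3
    have hle4 : ("2026-02-27" : String) ≤ date_str := not_lt.mp h4
    have hle5 : ("2026-03-06" : String) ≤ date_str := not_lt.mp h5
    have hle6 : ("2026-03-13" : String) ≤ date_str := not_lt.mp h6
    have hlt7 : date_str < ("2026-03-20" : String) := h7
    have hnle7 : ¬ (("2026-03-20" : String) ≤ date_str) := not_le.mpr hlt7
    have hlt8 : date_str < ("2026-03-27" : String) := lt_of_lt_of_le h7 (le_of_lt (by simp only [String.lt_iff_toList_lt]; decide))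
    have hnle8 : ¬ (("2026-03-27" : String) ≤ date_str) := not_le.mpr hlt8
    have hlt9 : date_str < ("2026-04-03" : String) := lt_of_lt_of_le h7 (le_of_lt (by simp only [String.lt_iff_toList_lt]; decide))
    have hnle9 : ¬ (("2026-04-03" : String) ≤ date_str) := not_le.mpr hlt9
    simp [get_next_session_after, get_next_session_after_alt, goA, bsLoop, SCHEDULE, sortedKeys, gt_iff_lt, h0, hle0, h1, hle1, h2, hle2, h3, hle3, h4, hle4, h5, hle5, h6, hle6, hlt7, hnle7, hlt8, hnle8, hlt9, hnle9] <;> decide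
  by_cases h8 : date_str < ("2026-03-27" : String)
  · -- first key greater than date_str is "2026-03-27"
    have hle0 : ("2026-01-30" : String) ≤ date_str := not_lt.mp h0
    have hle1 : ("2026-02-06" : String) ≤ date_str := not_lt.mp h1
    have hle2 : ("2026-02-13" : String) ≤ date_str := not_lt.mp h2
    have hle3 : ("2026-02-20" : String) ≤ date_str := not_lt.mp h3
    have hle4 : ("2026-02-27" : String) ≤ date_str := not_lt.mp h4
    have hle5 : ("2026-03-06" : String) ≤ date_str := not_lt.mp h5
    have hle6 : ("2026-03-13" : String) ≤ date_str := not_lt.mp h6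
    have hle7 : ("2026-03-20" : String) ≤ date_str := not_lt.mp h7
    have hlt8 : date_str < ("2026-03-27" : String) := h8
    have hnle8 : ¬ (("2026-03-27" : String) ≤ date_str) := not_le.mpr hlt8
    have hlt9 : date_str < ("2026-04-03" : String) := lt_of_lt_of_le h8 (le_of_lt (by simp only [String.lt_iff_toList_lt]; decide))
    have hnle9 : ¬ (("2026-04-03" : String) ≤ date_str) := not_le.mpr hlt9
    simp [get_next_session_after, get_next_session_after_alt, goA, bsLoop, SCHEDULE, sortedKeys, gt_iff_lt, h0, hle0, h1, hle1, h2, hle2, h3, hle3, h4, hle4, h5, hle5, h6, hle6, h7, hle7, hlt8, hnle8, hlt9, hnle9] <;> decide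
  by_cases h9 : date_str < ("2026-04-03" : String)
  · -- first key greater than date_str is "2026-04-03"
    have hle0 : ("2026-01-30" : String) ≤ date_str := not_lt.mp h0
    have hle1 : ("2026-02-06" : String) ≤ date_str := not_lt.mp h1
    have hle2 : ("2026-02-13" : String) ≤ date_str := not_lt.mp h2
    have hle3 : ("2026-02-20" : String) ≤ date_str := not_lt.mp h3
    have hle4 : ("2026-02-27" : String) ≤ date_str := not_lt.mp h4
    have hle5 : ("2026-03-06" : String) ≤ date_str := not_lt.mp h5
    have hle6 : ("2026-03-13" : String) ≤ date_str := not_lt.mp h6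
    have hle7 : ("2026-03-20" : String) ≤ date_str := not_lt.mp h7
    have hle8 : ("2026-03-27" : String) ≤ date_str := not_lt.mp h8
    have hlt9 : date_str < ("2026-04-03" : String) := h9
    have hnle9 : ¬ (("2026-04-03" : String) ≤ date_str) := not_le.mpr hlt9
    simp [get_next_session_after, get_next_session_after_alt, goA, bsLoop, SCHEDULE, sortedKeys, gt_iff_lt, h0, hle0, h1, hle1, h2, hle2, h3, hle3, h4, hle4, h5, hle5, h6, hle6, h7, hle7, h8, hle8, hlt9, hnle9] <;> decide
  -- no key is greater than date_str
  have hle0 : ("2026-01-30" : String) ≤ date_str := not_lt.mp h0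
  have hle1 : ("2026-02-06" : String) ≤ date_str := not_lt.mp h1
  have hle2 : ("2026-02-13" : String) ≤ date_str := not_lt.mp h2
  have hle3 : ("2026-02-20" : String) ≤ date_str := not_lt.mp h3
  have hle4 : ("2026-02-27" : String) ≤ date_str := not_lt.mp h4
  have hle5 : ("2026-03-06" : String) ≤ date_str := not_lt.mp h5
  have hle6 : ("2026-03-13" : String) ≤ date_str := not_lt.mp h6
  have hle7 : ("2026-03-20" : String) ≤ date_str := not_lt.mp h7
  have hle8 : ("2026-03-27" : String) ≤ date_str := not_lt.mp h8
  have hle9 : ("2026-04-03" : String) ≤ date_str := not_lt.mp h9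
  simp [get_next_session_after, get_next_session_after_alt, goA, bsLoop, SCHEDULE, sortedKeys, gt_iff_lt, h0, hle0, h1, hle1, h2, hle2, h3, hle3, h4, hle4, h5, hle5, h6, hle6, h7, hle7, h8, hle8, h9, hle9] <;> decide

-- ===== VERDICT (by name: the statement is the Claim_ definition above) =====
theorem get_next_session_after_spec : Claim_equal_get_next_session_after := by
  intro date_str _
  exact get_next_session_after_eq_alt date_str
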